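-- pv_equiv track=rewrite | github.com/maria-kovaleva-australia/eepnn | Problematic_Region_Detector_Files/codes/functions.py | identify_phi_edges
-- ===== SOURCE A (Python) =====
-- def identify_phi_edges(problematic_data):
--     """
--     Identifies the φ (phi) edges of problematic regions for each antenna.
--
--     This function processes a list of problematic regions, represented as a list of tuples
--     containing φ, θ, and power values, and groups them into contiguous regions
--     based on the φ angle. Non-contiguous regions are separated into distinct groups.
--
--     Parameters:
--     ----------
--     problematic_data : list of list of tuples
--         A list where each element represents a single antenna's problematic regions.
--         Each problematic region is defined as a list of tuples (φ, θ, power).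
--
--     Returns:
--     -------
--     list of list of list of tuples
--         A nested list where the first level corresponds to antennas, the second level
--         contains groups of contiguous φ regions, and each group contains tuples
--         representing (φ, θ, power).
--     """
--     phi_edges = []
--
--     for antenna in problematic_data:
--         if antenna:
--             temp = [[antenna[0]]]  # Start a new group with the first problematic point
--
--             for index in range(len(antenna) - 1):
--
--                 current = antenna[index]
--                 next_ = antenna[index + 1]
--
--                 # Check if the φ difference exceeds 1 (indicating a new group)
--                 if next_[0] - current[0] > 1:
--                     temp[-1].append(current)  # Close the current group
--                     temp.append([next_])     # Start a new group
--
--             temp[-1].append(antenna[-1])  # Add the last point to the last group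
--             phi_edges.append(temp)
--         else:
--             phi_edges.append([])
--
--     return phi_edges
-- ===== SOURCE B (Python) =====
-- def phi_groups(antenna):
--     if not antenna:
--         return []
--     breaks = [i for i in range(len(antenna) - 1)
--               if antenna[i + 1][0] - antenna[i][0] > 1]
--     starts = [0] + [i + 1 for i in breaks]
--     ends = breaks + [len(antenna) - 1]
--     return [[antenna[s], antenna[e]] for s, e in zip(starts, ends)]
--
--
-- def identify_phi_edges(problematic_data):
--     return [phi_groups(antenna) for antenna in problematic_data]
-- ===== Notes on version B (the rewrite author's own statement) =====
-- stated objective: simpler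
-- what changed: B replaces A's single stateful pass that mutates a nested group list (appending to the last group and opening new ones) with a staged pipeline: first compute the list of break indices where the phi gap exceeds 1, derive the start and end index lists from it, and then map zip(starts, ends) to the two endpoint tuples of each run.
import Mathlib
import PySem

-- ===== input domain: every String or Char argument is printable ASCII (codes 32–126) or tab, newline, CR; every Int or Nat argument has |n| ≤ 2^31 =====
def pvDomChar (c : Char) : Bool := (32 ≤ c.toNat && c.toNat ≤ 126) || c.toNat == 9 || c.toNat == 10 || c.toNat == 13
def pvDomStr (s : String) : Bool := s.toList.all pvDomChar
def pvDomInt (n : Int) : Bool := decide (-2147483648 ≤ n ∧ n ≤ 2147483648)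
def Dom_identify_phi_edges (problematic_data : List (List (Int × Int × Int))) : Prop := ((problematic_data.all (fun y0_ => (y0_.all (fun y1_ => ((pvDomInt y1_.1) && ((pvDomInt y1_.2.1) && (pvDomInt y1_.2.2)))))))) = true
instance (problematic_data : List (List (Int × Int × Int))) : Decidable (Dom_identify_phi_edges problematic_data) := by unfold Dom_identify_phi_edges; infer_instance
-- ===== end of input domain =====

-- B replaces A's single stateful pass mutating a nested group list by a staged pipeline:
-- compute the break indices, derive start/end index lists, and map zip(starts, ends) to
-- the two endpoint tuples of each run (objective: simpler).


-- ===== PORT A =====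
-- temp[-1].append(x) on a non-empty list of groups
def appendLast (temp : List (List (Int × Int × Int))) (x : Int × Int × Int) :
    List (List (Int × Int × Int)) :=
  match temp with
  | [] => []
  | [g] => [g ++ [x]]
  | g :: h :: t => g :: appendLast (h :: t) x

def identify_phi_edges (problematic_data : List (List (Int × Int × Int))) :
    List (List (List (Int × Int × Int))) :=
  problematic_data.foldl
    (fun phi_edges antenna =>
      if antenna ≠ [] then
        let temp :=
          (PySem.List.pyRange 0 ((antenna.length : Int) - 1)).foldl
            (fun temp index =>
              let current := PySem.List.pyGetD antenna index (0, 0, 0)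
              let next_ := PySem.List.pyGetD antenna (index + 1) (0, 0, 0)
              if next_.1 - current.1 > 1 then
                appendLast temp current ++ [[next_]]
              else temp)
            [[PySem.List.pyGetD antenna 0 (0, 0, 0)]]
        phi_edges ++ [appendLast temp (PySem.List.pyGetD antenna (-1) (0, 0, 0))]
      else
        phi_edges ++ [[]])
    []

-- ===== PORT B =====
def phiGroups (antenna : List (Int × Int × Int)) : List (List (Int × Int × Int)) :=
  match antenna with
  | [] => []
  | _ :: _ =>
    let breaks := (List.range (antenna.length - 1)).filter
      (fun i => (antenna.getD (i + 1) (0, 0, 0)).1 - (antenna.getD i (0, 0, 0)).1 > 1)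
    let starts := 0 :: breaks.map (fun i => i + 1)
    let ends := breaks ++ [antenna.length - 1]
    (starts.zip ends).map
      (fun se => [antenna.getD se.1 (0, 0, 0), antenna.getD se.2 (0, 0, 0)])

def identify_phi_edges_alt (problematic_data : List (List (Int × Int × Int))) :
    List (List (List (Int × Int × Int))) :=
  problematic_data.map phiGroups

-- ===== PRECONDITION & SPEC =====
def Spec_identify_phi_edges (problematic_data : List (List (Int × Int × Int))) (out : List (List (List (Int × Int × Int)))) : Prop := out = identify_phi_edges_alt problematic_data
instance (problematic_data : List (List (Int × Int × Int))) (out : List (List (List (Int × Int × Int)))) : Decidable (Spec_identify_phi_edges problematic_data out) := by unfold Spec_identify_phi_edges; infer_instance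

-- ===== CLAIM (what is proved, stated in full; the proofs are below) =====
def Claim_equal_identify_phi_edges : Prop := ∀ (problematic_data : List (List (Int × Int × Int))), Dom_identify_phi_edges problematic_data → Spec_identify_phi_edges problematic_data (identify_phi_edges problematic_data)

-- ===== LEMMAS AND PROOFS =====

-- temp[-1].append(x) on groups ++ [[st]] closes the last group: groups ++ [[st, x]]
theorem appendLast_snoc (gs : List (List (Int × Int × Int))) (st x : Int × Int × Int) :
    appendLast (gs ++ [[st]]) x = gs ++ [[st, x]] := by
  induction gs with
  | nil => rfl
  | cons g gs ih =>
    cases e : gs ++ [[st]] with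
    | nil => simp at e
    | cons h t =>
      rw [List.cons_append, e]
      show g :: appendLast (h :: t) x = g :: (gs ++ [[st, x]])
      rw [← e, ih]

-- A's nested-list surgery over indices equals a pair-state fold (groups built so far, current start)
theorem fold_inv (ant : List (Int × Int × Int)) (l : List Nat) :
    ∀ (gs : List (List (Int × Int × Int))) (st : Int × Int × Int),
      l.foldl
        (fun temp i =>
          if (ant.getD (i + 1) (0, 0, 0)).1 - (ant.getD i (0, 0, 0)).1 > 1 then
            appendLast temp (ant.getD i (0, 0, 0)) ++ [[ant.getD (i + 1) (0, 0, 0)]]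
          else temp)
        (gs ++ [[st]])
      = (l.foldl
            (fun (s : List (List (Int × Int × Int)) × (Int × Int × Int)) i =>
              if (ant.getD (i + 1) (0, 0, 0)).1 - (ant.getD i (0, 0, 0)).1 > 1 then
                (s.1 ++ [[s.2, ant.getD i (0, 0, 0)]], ant.getD (i + 1) (0, 0, 0))
              else s)
            (gs, st)).1
        ++ [[(l.foldl
            (fun (s : List (List (Int × Int × Int)) × (Int × Int × Int)) i =>
              if (ant.getD (i + 1) (0, 0, 0)).1 - (ant.getD i (0, 0, 0)).1 > 1 then
                (s.1 ++ [[s.2, ant.getD i (0, 0, 0)]], ant.getD (i + 1) (0, 0, 0))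
              else s)
            (gs, st)).2]] := by
  induction l with
  | nil => intro gs st; rfl
  | cons i l ih =>
    intro gs st
    by_cases h : (ant.getD (i + 1) (0, 0, 0)).1 - (ant.getD i (0, 0, 0)).1 > 1
    · simp only [List.foldl_cons, if_pos h, appendLast_snoc]
      exact ih (gs ++ [[st, ant.getD i (0, 0, 0)]]) (ant.getD (i + 1) (0, 0, 0))
    · simp only [List.foldl_cons, if_neg h]
      exact ih gs st

-- the pair-state fold, closed by the final point, equals the break-list zip construction
theorem fold_breaks (ant : List (Int × Int × Int)) (last : Int × Int × Int) (l : List Nat) :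
    ∀ (gs : List (List (Int × Int × Int))) (st : Int × Int × Int),
      (l.foldl
          (fun (s : List (List (Int × Int × Int)) × (Int × Int × Int)) i =>
            if (ant.getD (i + 1) (0, 0, 0)).1 - (ant.getD i (0, 0, 0)).1 > 1 then
              (s.1 ++ [[s.2, ant.getD i (0, 0, 0)]], ant.getD (i + 1) (0, 0, 0))
            else s)
          (gs, st)).1
      ++ [[(l.foldl
          (fun (s : List (List (Int × Int × Int)) × (Int × Int × Int)) i =>
            if (ant.getD (i + 1) (0, 0, 0)).1 - (ant.getD i (0, 0, 0)).1 > 1 then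
              (s.1 ++ [[s.2, ant.getD i (0, 0, 0)]], ant.getD (i + 1) (0, 0, 0))
            else s)
          (gs, st)).2, last]]
      = gs ++
        (((st :: (l.filter (fun i =>
              (ant.getD (i + 1) (0, 0, 0)).1 - (ant.getD i (0, 0, 0)).1 > 1)).map
                (fun i => ant.getD (i + 1) (0, 0, 0))).zip
          ((l.filter (fun i =>
              (ant.getD (i + 1) (0, 0, 0)).1 - (ant.getD i (0, 0, 0)).1 > 1)).map
                (fun i => ant.getD i (0, 0, 0)) ++ [last])).map
          (fun p => [p.1, p.2])) := by
  induction l with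
  | nil => intro gs st; rfl
  | cons i l ih =>
    intro gs st
    by_cases h : (ant.getD (i + 1) (0, 0, 0)).1 - (ant.getD i (0, 0, 0)).1 > 1
    · have hpos : List.filter (fun i =>
          (ant.getD (i + 1) (0, 0, 0)).1 - (ant.getD i (0, 0, 0)).1 > 1) (i :: l)
          = i :: List.filter (fun i =>
          (ant.getD (i + 1) (0, 0, 0)).1 - (ant.getD i (0, 0, 0)).1 > 1) l :=
        List.filter_cons_of_pos (by simpa using h)
      simp only [List.foldl_cons, if_pos h]
      rw [hpos, ih (gs ++ [[st, ant.getD i (0, 0, 0)]]) (ant.getD (i + 1) (0, 0, 0))]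
      simp
    · have hneg : List.filter (fun i =>
          (ant.getD (i + 1) (0, 0, 0)).1 - (ant.getD i (0, 0, 0)).1 > 1) (i :: l)
          = List.filter (fun i =>
          (ant.getD (i + 1) (0, 0, 0)).1 - (ant.getD i (0, 0, 0)).1 > 1) l :=
        List.filter_cons_of_neg (by simpa using h)
      simp only [List.foldl_cons, if_neg h]
      rw [hneg]
      exact ih gs st

-- last element of a nonempty list via Python's [-1], as getD at length-1
theorem pyGetD_neg_one_getD (a0 : Int × Int × Int) (tail : List (Int × Int × Int)) :
    PySem.List.pyGetD (a0 :: tail) (-1) (0, 0, 0) = (a0 :: tail).getD tail.length (0, 0, 0) := by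
  rw [PySem.List.pyGetD_neg_one (a0 :: tail) (0, 0, 0) (by simp)]
  rw [List.getD_eq_getElem (a0 :: tail) (0, 0, 0) (by simp), List.getLast_eq_getElem]
  simp
  rfl

-- per-antenna agreement of the two constructions
theorem per_antenna (antenna : List (Int × Int × Int)) :
    (if antenna ≠ [] then
        appendLast
          ((PySem.List.pyRange 0 ((antenna.length : Int) - 1)).foldl
            (fun temp index =>
              let current := PySem.List.pyGetD antenna index (0, 0, 0)
              let next_ := PySem.List.pyGetD antenna (index + 1) (0, 0, 0)
              if next_.1 - current.1 > 1 then
                appendLast temp current ++ [[next_]]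
              else temp)
            [[PySem.List.pyGetD antenna 0 (0, 0, 0)]])
          (PySem.List.pyGetD antenna (-1) (0, 0, 0))
      else [])
    = phiGroups antenna := by
  cases antenna with
  | nil => rfl
  | cons a0 tail =>
    simp only [ne_eq, reduceCtorEq, not_false_eq_true, if_true]
    have hlen : ((List.length (a0 :: tail) : Int) - 1) = (tail.length : Int) := by
      push_cast [List.length_cons]; ring
    rw [hlen, PySem.List.pyRange_zero_natCast, List.foldl_map]
    have hidx :
        (List.range tail.length).foldl
          (fun temp (i : Nat) =>
            let current := PySem.List.pyGetD (a0 :: tail) (i : Int) (0, 0, 0)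
            let next_ := PySem.List.pyGetD (a0 :: tail) ((i : Int) + 1) (0, 0, 0)
            if next_.1 - current.1 > 1 then
              appendLast temp current ++ [[next_]]
            else temp)
          [[PySem.List.pyGetD (a0 :: tail) 0 (0, 0, 0)]]
        = (List.range tail.length).foldl
            (fun temp i =>
              if ((a0 :: tail).getD (i + 1) (0, 0, 0)).1 -
                  ((a0 :: tail).getD i (0, 0, 0)).1 > 1 then
                appendLast temp ((a0 :: tail).getD i (0, 0, 0)) ++
                  [[(a0 :: tail).getD (i + 1) (0, 0, 0)]]
              else temp)
            ([] ++ [[a0]]) := by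
      congr 1
      · funext temp i
        have h1 : ((i : Int) + 1) = ((i + 1 : Nat) : Int) := by push_cast; ring
        rw [h1]
        simp only [PySem.List.pyGetD_natCast]
      · simp [PySem.List.pyGetD_zero_cons]
    rw [hidx, fold_inv, appendLast_snoc, pyGetD_neg_one_getD,
      fold_breaks (a0 :: tail) ((a0 :: tail).getD tail.length (0, 0, 0))
        (List.range tail.length) [] a0]
    -- now match B's staged zip construction
    show _ = phiGroups (a0 :: tail)
    unfold phiGroups
    simp only [List.length_cons, Nat.add_sub_cancel, List.nil_append]
    set g : Nat → Int × Int × Int := fun i => (a0 :: tail).getD i (0, 0, 0) with hg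
    set bs := (List.range tail.length).filter
      (fun i => ((a0 :: tail).getD (i + 1) (0, 0, 0)).1 -
        ((a0 :: tail).getD i (0, 0, 0)).1 > 1) with hbs
    have hfe : (fun se : Nat × Nat =>
        [(a0 :: tail).getD se.1 (0, 0, 0), (a0 :: tail).getD se.2 (0, 0, 0)])
        = (fun p : (Int × Int × Int) × (Int × Int × Int) => [p.1, p.2]) ∘ Prod.map g g := by
      funext se; rfl
    rw [hfe, ← List.map_map, ← List.zip_map]
    simp only [List.map_cons, List.map_map, List.map_append, List.map_cons]
    rfl
  
-- ===== VERDICT (by name: the statement is the Claim_ definition above) =====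
theorem identify_phi_edges_spec : Claim_equal_identify_phi_edges := by
  intro pd _
  unfold Spec_identify_phi_edges identify_phi_edges identify_phi_edges_alt
  have hstep : (fun (phi_edges : List (List (List (Int × Int × Int))))
      (antenna : List (Int × Int × Int)) =>
      if antenna ≠ [] then
        let temp :=
          (PySem.List.pyRange 0 ((antenna.length : Int) - 1)).foldl
            (fun temp index =>
              let current := PySem.List.pyGetD antenna index (0, 0, 0)
              let next_ := PySem.List.pyGetD antenna (index + 1) (0, 0, 0)
              if next_.1 - current.1 > 1 then
                appendLast temp current ++ [[next_]]
              else temp)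
            [[PySem.List.pyGetD antenna 0 (0, 0, 0)]]
        phi_edges ++ [appendLast temp (PySem.List.pyGetD antenna (-1) (0, 0, 0))]
      else
        phi_edges ++ [[]])
      = fun phi_edges antenna => phi_edges ++ [phiGroups antenna] := by
    funext phi_edges antenna
    rw [← per_antenna antenna]
    by_cases h : antenna = [] <;> simp [h]
  rw [hstep, PySem.List.foldl_append_singleton_eq_map]
  simp
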